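-- pv_equiv track=rewrite | github.com/shohei1029/16spp | extractDomain_getPosinToml_inAlignedFasta_createSecFasta.py | seqpos_to_gapped_seqpos
-- ===== SOURCE A (Python) =====
-- def seqpos_to_gapped_seqpos(pos,seq):
-- #    '''
-- #    ギャップなしFASTAファイルのpositionをギャップ有りFASTAファイルのpositionへ変換
-- #    convert char position in ungapped FASTA to gapped FASTA. (I'm sorry I can't use English well.)
-- #    '''
--     c_count = 0
--     gapped_pos = 0
--     for c in seq:
--         if c != '-':
--             c_count += 1
--         gapped_pos += 1
--         if c_count == pos:
--             return gapped_pos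
-- ===== SOURCE B (Python) =====
-- def seqpos_to_gapped_seqpos(pos, seq):
--     # Pass 1: prefix counts of non-gap characters.
--     counts = []
--     total = 0
--     for c in seq:
--         if c != '-':
--             total += 1
--         counts.append(total)
--     # Pass 2: first index whose prefix count equals pos -> 1-based gapped position.
--     for i, cnt in enumerate(counts):
--         if cnt == pos:
--             return i + 1
--     return None
-- ===== Notes on version B (the rewrite author's own statement) =====
-- stated objective: alternative
-- what changed: B separates the work into two passes: it first materializes the prefix-sum table of non-gap counts, then searches that table for the first index whose count equals pos, instead of A's single fused count-and-test loop with an early return.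
import Mathlib
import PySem

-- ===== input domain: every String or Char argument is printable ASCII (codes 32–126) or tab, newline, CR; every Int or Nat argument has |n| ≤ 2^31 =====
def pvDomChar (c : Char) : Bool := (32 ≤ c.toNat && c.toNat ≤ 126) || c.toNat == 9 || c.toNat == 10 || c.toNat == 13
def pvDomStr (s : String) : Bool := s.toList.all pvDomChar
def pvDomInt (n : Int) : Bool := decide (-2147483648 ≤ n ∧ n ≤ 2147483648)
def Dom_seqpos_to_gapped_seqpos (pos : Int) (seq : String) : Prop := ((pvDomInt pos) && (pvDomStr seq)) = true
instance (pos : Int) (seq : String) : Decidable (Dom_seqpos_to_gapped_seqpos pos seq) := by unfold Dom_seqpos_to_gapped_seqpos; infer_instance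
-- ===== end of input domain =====

-- B re-decomposes A's fused count-and-test loop into two passes (prefix-count table, then search); same cost, alternative structure.

-- ===== PORT A =====
-- A's single loop: count non-gaps, bump gapped_pos, early-return when the count hits pos.
def pvALoop (pos : Int) : List Char → Int → Int → Option Int
  | [], _, _ => none
  | c :: rest, c_count, gapped_pos =>
    let c_count' := if c ≠ '-' then c_count + 1 else c_count
    let gapped_pos' := gapped_pos + 1
    if c_count' == pos then some gapped_pos'
    else pvALoop pos rest c_count' gapped_pos'

def seqpos_to_gapped_seqpos (pos : Int) (seq : String) : Option Int :=
  pvALoop pos seq.toList 0 0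

-- ===== PORT B =====
-- Pass 1 of Source B: the prefix-count table.
def pvBCounts : List Char → Int → List Int
  | [], _ => []
  | c :: rest, total =>
    let total' := if c ≠ '-' then total + 1 else total
    total' :: pvBCounts rest total'

-- Pass 2 of Source B: the search over enumerate(counts).
def pvBFind (pos : Int) : List (Int × Int) → Option Int
  | [] => none
  | (i, cnt) :: rest => if cnt == pos then some (i + 1) else pvBFind pos rest

def seqpos_to_gapped_seqpos_alt (pos : Int) (seq : String) : Option Int :=
  pvBFind pos (PySem.List.enumerate (pvBCounts seq.toList 0) 0)

-- ===== PRECONDITION & SPEC =====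
def Spec_seqpos_to_gapped_seqpos (pos : Int) (seq : String) (out : Option Int) : Prop := out = seqpos_to_gapped_seqpos_alt pos seq
instance (pos : Int) (seq : String) (out : Option Int) : Decidable (Spec_seqpos_to_gapped_seqpos pos seq out) := by unfold Spec_seqpos_to_gapped_seqpos; infer_instance

-- ===== CLAIM (what is proved, stated in full; the proofs are below) =====
def Claim_equal_seqpos_to_gapped_seqpos : Prop := ∀ (pos : Int) (seq : String), Dom_seqpos_to_gapped_seqpos pos seq → Spec_seqpos_to_gapped_seqpos pos seq (seqpos_to_gapped_seqpos pos seq)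

-- ===== LEMMAS AND PROOFS =====
theorem pvALoop_eq_find (pos : Int) (l : List Char) :
    ∀ (cc gp : Int), pvALoop pos l cc gp = pvBFind pos (PySem.List.enumerate (pvBCounts l cc) gp) := by
  induction l with
  | nil => intro cc gp; simp [pvALoop, pvBCounts, pvBFind]
  | cons c rest ih =>
    intro cc gp
    simp only [pvALoop, pvBCounts, PySem.List.enumerate_cons, pvBFind]
    split_ifs <;> simp_all

-- ===== VERDICT (by name: the statement is the Claim_ definition above) =====
theorem seqpos_to_gapped_seqpos_spec : Claim_equal_seqpos_to_gapped_seqpos := by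
  intro pos seq _
  unfold Spec_seqpos_to_gapped_seqpos seqpos_to_gapped_seqpos seqpos_to_gapped_seqpos_alt
  exact pvALoop_eq_find pos seq.toList 0 0
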